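-- pv_equiv track=rewrite | github.com/asweigart/programmedpatterns | book/visualpatterns.py | pattern61
-- ===== SOURCE A (Python) =====
-- def pattern61(step):
--     size = 1
--     for i in range(2, step + 1):
--         if i % 2 == 0:
--             size += 2
--         else:
--             size -= 1
--     row = ('O' * size) + '\n'
--     pattern = row * size
--     return pattern
-- ===== SOURCE B (Python) =====
-- def pattern61(step):
--     # Closed form: size = 1 + 2*(# even i in [2,step]) - (# odd i in [2,step])
--     size = 1 + 2 * max(0, step // 2) - max(0, (step - 1) // 2)
--     row = ('O' * size) + '\n'
--     return row * size
-- ===== Notes on version B (the rewrite author's own statement) =====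
-- stated objective: simpler
-- what changed: The accumulator loop over range(2, step+1) is replaced by a closed-form arithmetic formula for size (counting even and odd iterations with integer division); the string build is unchanged.
import Mathlib
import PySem

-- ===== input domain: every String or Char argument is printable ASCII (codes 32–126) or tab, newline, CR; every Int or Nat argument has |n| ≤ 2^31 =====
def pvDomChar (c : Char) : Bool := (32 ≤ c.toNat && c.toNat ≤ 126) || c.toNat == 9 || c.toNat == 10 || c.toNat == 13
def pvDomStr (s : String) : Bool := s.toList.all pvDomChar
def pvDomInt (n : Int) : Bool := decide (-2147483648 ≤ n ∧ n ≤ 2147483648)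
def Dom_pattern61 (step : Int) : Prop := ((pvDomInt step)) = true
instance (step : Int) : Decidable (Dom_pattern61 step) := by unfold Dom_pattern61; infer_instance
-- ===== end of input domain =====

-- B replaces A's accumulator loop by a closed-form arithmetic formula for size (objective: simpler).

-- ===== PORT A =====
def pattern61 (step : Int) : String :=
  let size := (PySem.List.pyRange 2 (step + 1) 1).foldl
      (fun size i => if PySem.Int.mod i 2 == 0 then size + 2 else size - 1) (1 : Int)
  let row := PySem.List.pyRepeat ['O'] size ++ ['\n']
  String.ofList (PySem.List.pyRepeat row size)

-- ===== PORT B =====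
def pattern61_alt (step : Int) : String :=
  let size := 1 + 2 * max 0 (PySem.Int.floordiv step 2)
                - max 0 (PySem.Int.floordiv (step - 1) 2)
  let row := PySem.List.pyRepeat ['O'] size ++ ['\n']
  String.ofList (PySem.List.pyRepeat row size)

-- ===== PRECONDITION & SPEC =====
def Spec_pattern61 (step : Int) (out : String) : Prop := out = pattern61_alt step
instance (step : Int) (out : String) : Decidable (Spec_pattern61 step out) := by unfold Spec_pattern61; infer_instance

-- ===== CLAIM (what is proved, stated in full; the proofs are below) =====
def Claim_equal_pattern61 : Prop := ∀ (step : Int), Dom_pattern61 step → Spec_pattern61 step (pattern61 step)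

-- ===== LEMMAS AND PROOFS =====

-- A's loop body
def pvStep61 (size i : Int) : Int := if PySem.Int.mod i 2 == 0 then size + 2 else size - 1

theorem pvStep61_eq (size i : Int) :
    pvStep61 size i = if i % 2 = 0 then size + 2 else size - 1 := by
  simp [pvStep61, PySem.Int.mod, Int.fmod_eq_emod]

-- B's closed form
def pvSize61 (step : Int) : Int :=
  1 + 2 * max 0 (PySem.Int.floordiv step 2) - max 0 (PySem.Int.floordiv (step - 1) 2)

theorem pvSize61_eq (step : Int) :
    pvSize61 step = 1 + 2 * max 0 (step / 2) - max 0 ((step - 1) / 2) := by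
  simp [pvSize61, PySem.Int.floordiv, Int.fdiv_eq_ediv]

-- the loop's result equals the closed form, for 1 ≤ n, by upward induction
theorem pvLoop61_closed (n : Int) (h : 1 ≤ n) :
    (PySem.List.pyRange 2 (n + 1) 1).foldl pvStep61 1 = pvSize61 n := by
  induction n, h using Int.le_induction with
  | base =>
      rw [PySem.List.pyRange_one_eq_nil (by omega)]
      simp [pvSize61_eq]
  | succ n hn ih =>
      rw [show n + 1 + 1 = (n + 1) + 1 from rfl,
          PySem.List.pyRange_one_succ_right (by omega : (2:Int) ≤ n + 1),
          List.foldl_append, ih]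
      simp only [List.foldl, pvStep61_eq, pvSize61_eq]
      split
      · next hpar => omega
      · next hpar => omega

theorem pvSize61_agree (step : Int) :
    (PySem.List.pyRange 2 (step + 1) 1).foldl pvStep61 1 = pvSize61 step := by
  rcases le_or_gt step 1 with h | h
  · rw [PySem.List.pyRange_one_eq_nil (by omega)]
    rw [pvSize61_eq]
    have h1 : max 0 (step / 2) = 0 := by omega
    have h2 : max 0 ((step - 1) / 2) = 0 := by omega
    simp [List.foldl, h1, h2]
  · exact pvLoop61_closed step (by omega)

-- ===== VERDICT (by name: the statement is the Claim_ definition above) =====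
theorem pattern61_spec : Claim_equal_pattern61 := by
  intro step _
  show pattern61 step = pattern61_alt step
  unfold pattern61 pattern61_alt
  rw [show (fun (size i : Int) => if PySem.Int.mod i 2 == 0 then size + 2 else size - 1) = pvStep61 from rfl,
      pvSize61_agree]
  rfl
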